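-- pv_equiv track=rewrite | github.com/GiacomoSaporetti/pulp-trainlib | tools/TrainLib_Deployer/utils/DNN_Composer.py | AdjustResConnList
-- ===== SOURCE A (Python) =====
-- def AdjustResConnList(sumnode_connections):
--     res = []
--     for layer in range(len(sumnode_connections)):
--         if sumnode_connections[layer] == 0:
--             res.append(-1)
--         else:
--             my_value = sumnode_connections[layer]
--             for scanned_layer in range(len(sumnode_connections)):
--                 if sumnode_connections[scanned_layer] == my_value and layer != scanned_layer:
--                     res.append(scanned_layer)
--     return res
-- ===== SOURCE B (Python) =====
-- def AdjustResConnList(sumnode_connections):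
--     groups = {}
--     for i, v in enumerate(sumnode_connections):
--         groups.setdefault(v, []).append(i)
--     res = []
--     for i, v in enumerate(sumnode_connections):
--         if v == 0:
--             res.append(-1)
--         else:
--             res.extend(j for j in groups[v] if j != i)
--     return res
-- ===== Notes on version B (the rewrite author's own statement) =====
-- stated objective: alternative
-- what changed: B builds a value->indices dict in one grouping pass and emits each layer's matches from its group, instead of A's per-layer rescan of the whole list; cost is dominated by the output size either way.
import Mathlib
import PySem

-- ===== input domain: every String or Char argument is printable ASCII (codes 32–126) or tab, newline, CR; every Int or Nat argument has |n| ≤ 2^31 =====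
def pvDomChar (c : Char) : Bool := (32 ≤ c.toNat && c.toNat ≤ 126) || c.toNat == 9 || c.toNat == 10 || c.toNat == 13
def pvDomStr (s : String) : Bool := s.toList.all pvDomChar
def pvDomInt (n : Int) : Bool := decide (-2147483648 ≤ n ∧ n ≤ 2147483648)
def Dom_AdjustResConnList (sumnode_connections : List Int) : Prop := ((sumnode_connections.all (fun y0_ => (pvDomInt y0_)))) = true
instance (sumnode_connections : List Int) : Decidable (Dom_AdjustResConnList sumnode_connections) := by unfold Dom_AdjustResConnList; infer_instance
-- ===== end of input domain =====

-- B groups indices by value in one dict pass and emits each layer's matches from its group, instead of A's per-layer rescan (alternative structure; return value only).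

-- ===== PORT A =====
def AdjustResConnList (sumnode_connections : List Int) : List Int :=
  (PySem.List.pyRange 0 sumnode_connections.length 1).foldl (fun res layer =>
    if PySem.List.pyGetD sumnode_connections layer 0 = 0 then res ++ [-1]
    else
      let my_value := PySem.List.pyGetD sumnode_connections layer 0
      (PySem.List.pyRange 0 sumnode_connections.length 1).foldl (fun res scanned_layer =>
        if PySem.List.pyGetD sumnode_connections scanned_layer 0 = my_value ∧ layer ≠ scanned_layer
        then res ++ [scanned_layer] else res) res) []

-- ===== PORT B =====
-- groups.setdefault(v, []).append(i)  =  insert v (getD v [] ++ [i])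
def pvGroups (xs : List (Int × Int)) (d : PySem.Dict Int (List Int)) : PySem.Dict Int (List Int) :=
  xs.foldl (fun d p => d.insert p.2 (d.getD p.2 [] ++ [p.1])) d

def AdjustResConnList_alt (sumnode_connections : List Int) : List Int :=
  let groups := pvGroups (PySem.List.enumerate sumnode_connections 0) PySem.Dict.empty
  (PySem.List.enumerate sumnode_connections 0).foldl (fun res p =>
    if p.2 = 0 then res ++ [-1]
    else res ++ (groups.getD p.2 []).filter (fun j => j ≠ p.1)) []

-- ===== PRECONDITION & SPEC =====
def Spec_AdjustResConnList (sumnode_connections : List Int) (out : List Int) : Prop := out = AdjustResConnList_alt sumnode_connections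
instance (sumnode_connections : List Int) (out : List Int) : Decidable (Spec_AdjustResConnList sumnode_connections out) := by unfold Spec_AdjustResConnList; infer_instance

-- ===== CLAIM (what is proved, stated in full; the proofs are below) =====
def Claim_equal_AdjustResConnList : Prop := ∀ (sumnode_connections : List Int), Dom_AdjustResConnList sumnode_connections → Spec_AdjustResConnList sumnode_connections (AdjustResConnList sumnode_connections)

-- ===== LEMMAS AND PROOFS =====

-- the grouping dict looked up at v is the (ordered) first components of the pairs with second component v
lemma pvGroups_getD (xs : List (Int × Int)) (d : PySem.Dict Int (List Int)) (v : Int) :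
    (pvGroups xs d).getD v [] = d.getD v [] ++ ((xs.filter (fun p => p.2 = v)).map (·.1)) := by
  induction xs generalizing d with
  | nil => simp [pvGroups]
  | cons p xs ih =>
      simp only [pvGroups, List.foldl_cons, List.filter_cons] at *
      rw [ih]
      by_cases h : p.2 = v
      · simp [h]
      · simp [h, PySem.Dict.getD_insert, Ne.symm h]

lemma AdjustResConnList_eq (xs : List Int) :
    AdjustResConnList xs = AdjustResConnList_alt xs := by
  unfold AdjustResConnList AdjustResConnList_alt
  rw [PySem.List.enumerate_eq_map_pyRange xs (0 : Int), List.foldl_map]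
  apply PySem.List.foldl_congr_mem
  intro res j hj
  simp only []
  by_cases h0 : PySem.List.pyGetD xs j 0 = 0
  · simp [h0]
  · simp only [h0, if_false]
    rw [PySem.List.foldl_append_ite_eq_filter]
    rw [pvGroups_getD, PySem.Dict.getD_empty]
    simp only [List.nil_append, List.filter_map, List.map_map, Function.comp_def,
      List.filter_filter, List.map_id', PySem.List.len_eq]
    congr 1
    refine List.filter_congr (fun s _ => ?_)
    simp [and_comm, ne_comm]

-- ===== VERDICT (by name: the statement is the Claim_ definition above) =====
theorem AdjustResConnList_spec : Claim_equal_AdjustResConnList := by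
  intro xs _
  unfold Spec_AdjustResConnList
  exact AdjustResConnList_eq xs
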